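-- pv_equiv track=rewrite | github.com/DoA26-VWLM/DoA26_Community_Detection_Algorithms_Comparisons | code/BruteForce.py | group_communities
-- ===== SOURCE A (Python) =====
-- def group_communities(nodes, partition):
--     groups = {}
--
--     for i in range(len(nodes)):
--         node = nodes[i]
--         comm = partition[i]
--
--         if comm not in groups:
--             groups[comm] = []
--
--         groups[comm].append(node)
--
--     return groups
-- ===== SOURCE B (Python) =====
-- def group_communities(nodes, partition):
--     labels = []
--     for i in range(len(nodes)):
--         c = partition[i]
--         if c not in labels:
--             labels.append(c)
--     return {c: [nodes[i] for i in range(len(nodes)) if partition[i] == c]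
--             for c in labels}
-- ===== Notes on version B (the rewrite author's own statement) =====
-- stated objective: alternative
-- what changed: Replaces A's single accumulating dict pass with a two-phase structure: first collect the distinct community labels in order of first appearance, then build each group by a separate per-label filtering pass over the indices.
import Mathlib
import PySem

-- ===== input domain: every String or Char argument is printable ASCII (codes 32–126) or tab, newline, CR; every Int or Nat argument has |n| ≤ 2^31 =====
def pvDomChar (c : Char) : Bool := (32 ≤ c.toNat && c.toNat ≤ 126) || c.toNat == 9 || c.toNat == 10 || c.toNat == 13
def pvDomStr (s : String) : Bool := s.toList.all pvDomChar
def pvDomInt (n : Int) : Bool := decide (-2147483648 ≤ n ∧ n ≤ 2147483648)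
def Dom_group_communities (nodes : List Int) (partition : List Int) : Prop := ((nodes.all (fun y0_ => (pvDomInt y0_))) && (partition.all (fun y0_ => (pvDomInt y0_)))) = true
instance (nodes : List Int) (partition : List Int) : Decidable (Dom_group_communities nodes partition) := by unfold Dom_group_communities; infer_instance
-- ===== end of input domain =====

-- B groups by first collecting distinct labels, then one filtering pass per label; same return value as A.

-- ===== PORT A =====
-- one accumulating pass: dict of comm -> list of nodes (groups[comm].append(node) is Dict.modify)
def group_communities (nodes : List Int) (partition : List Int) : List (Int × List Int) :=
  ((PySem.List.pyRange 0 (nodes.length : Int) 1).foldl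
    (fun (groups : PySem.Dict Int (List Int)) i =>
      let node := PySem.List.pyGetD nodes i 0
      let comm := PySem.List.pyGetD partition i 0
      let groups := if groups.contains comm then groups else groups.insert comm []
      groups.modify comm [] (· ++ [node]))
    PySem.Dict.empty).items

-- ===== PORT B =====
def group_communities_alt (nodes : List Int) (partition : List Int) : List (Int × List Int) :=
  let labels := (PySem.List.pyRange 0 (nodes.length : Int) 1).foldl
    (fun (ls : List Int) i =>
      let c := PySem.List.pyGetD partition i 0
      if c ∈ ls then ls else ls ++ [c]) []
  (labels.foldl
    (fun (d : PySem.Dict Int (List Int)) c =>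
      d.insert c ((PySem.List.pyRange 0 (nodes.length : Int) 1).filterMap
        (fun i => if PySem.List.pyGetD partition i 0 = c then some (PySem.List.pyGetD nodes i 0) else none)))
    PySem.Dict.empty).items

-- ===== PRECONDITION & SPEC =====
-- A raises IndexError when partition is shorter than nodes; excluded (A returns nothing there).
def Pre_group_communities (nodes : List Int) (partition : List Int) : Prop :=
  nodes.length ≤ partition.length
instance (nodes : List Int) (partition : List Int) : Decidable (Pre_group_communities nodes partition) := by unfold Pre_group_communities; infer_instance
def pvWitness_group_communities : List Int × List Int := ([1, 2, 3], [0, 1, 0])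

def Spec_group_communities (nodes : List Int) (partition : List Int) (out : List (Int × List Int)) : Prop := out = group_communities_alt nodes partition
instance (nodes : List Int) (partition : List Int) (out : List (Int × List Int)) : Decidable (Spec_group_communities nodes partition out) := by unfold Spec_group_communities; infer_instance

-- ===== CLAIM (what is proved, stated in full; the proofs are below) =====
def Claim_equal_group_communities : Prop := ∀ (nodes : List Int) (partition : List Int), Dom_group_communities nodes partition → Pre_group_communities nodes partition → Spec_group_communities nodes partition (group_communities nodes partition)

-- ===== LEMMAS AND PROOFS =====

-- the index loop reads exactly the pairs (partition[i], nodes[i]), i.e. partition.zip nodes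
lemma pyRange_map_zip (nodes partition : List Int) (h : nodes.length ≤ partition.length) :
    (PySem.List.pyRange 0 (nodes.length : Int) 1).map
      (fun i => (PySem.List.pyGetD partition i 0, PySem.List.pyGetD nodes i 0))
    = partition.zip nodes := by
  apply List.ext_getElem
  · simp [PySem.List.length_pyRange_one]
    omega
  · intro k h1 h2
    have hk : k < nodes.length := by
      simpa [PySem.List.length_pyRange_one] using h1
    have hk' : k < partition.length := lt_of_lt_of_le hk h
    simp only [List.getElem_map, PySem.List.getElem_pyRange_one, List.getElem_zip]
    have e1 : (0 : Int) + (k : Int) = ((k : Nat) : Int) := by ring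
    rw [e1, PySem.List.pyGetD_natCast, PySem.List.pyGetD_natCast,
        List.getD_eq_getElem _ _ hk, List.getD_eq_getElem _ _ hk']

-- a fold over the index range reading both lists is a fold over the zipped pairs
lemma foldl_idx {A : Type} (nodes partition : List Int) (h : nodes.length ≤ partition.length)
    (g : A → Int → Int → A) (init : A) :
    (PySem.List.pyRange 0 (nodes.length : Int) 1).foldl
      (fun a i => g a (PySem.List.pyGetD partition i 0) (PySem.List.pyGetD nodes i 0)) init
    = (partition.zip nodes).foldl (fun a p => g a p.1 p.2) init := by
  rw [← pyRange_map_zip nodes partition h, List.foldl_map]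

-- a list comprehension over the index range reading both lists, likewise
lemma filterMap_idx {A : Type} (nodes partition : List Int) (h : nodes.length ≤ partition.length)
    (g : Int → Int → Option A) :
    (PySem.List.pyRange 0 (nodes.length : Int) 1).filterMap
      (fun i => g (PySem.List.pyGetD partition i 0) (PySem.List.pyGetD nodes i 0))
    = (partition.zip nodes).filterMap (fun p => g p.1 p.2) := by
  rw [← pyRange_map_zip nodes partition h, List.filterMap_map]
  rfl

-- A's guarded insert-then-append step is exactly a Dict.modify step
lemma stepA_eq_modify (g : PySem.Dict Int (List Int)) (c n : Int) :
    (if g.contains c then g else g.insert c []).modify c [] (· ++ [n])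
    = g.modify c [] (· ++ [n]) := by
  by_cases h : g.contains c
  · simp [h]
  · have hb : g.contains c = false := by simpa using h
    simp [hb, PySem.Dict.modify, PySem.Dict.insert_insert_self, PySem.Dict.getD_insert_self,
      PySem.Dict.getD_of_not_contains g [] hb]

lemma filterMap_pairs (l : List (Int × Int)) (c : Int) :
    l.filterMap (fun p => if p.1 = c then some p.2 else none)
    = (l.filter (fun p => p.1 == c)).map (·.2) := by
  induction l with
  | nil => rfl
  | cons p t ih =>
    by_cases hp : p.1 = c <;> simp [hp, ih]

-- ===== VERDICT (by name: the statement is the Claim_ definition above) =====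
theorem group_communities_spec : Claim_equal_group_communities := by
  intro nodes partition _ hpre
  unfold Spec_group_communities group_communities group_communities_alt
  set l := partition.zip nodes with hl
  -- A side: rewrite the index fold to the pure modify fold over l
  have hA :
      (PySem.List.pyRange 0 (nodes.length : Int) 1).foldl
        (fun (groups : PySem.Dict Int (List Int)) i =>
          let node := PySem.List.pyGetD nodes i 0
          let comm := PySem.List.pyGetD partition i 0
          let groups := if groups.contains comm then groups else groups.insert comm []
          groups.modify comm [] (· ++ [node])) PySem.Dict.empty
      = l.foldl (fun d p => d.modify p.1 [] (· ++ [p.2])) PySem.Dict.empty :=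
    (foldl_idx nodes partition hpre
      (fun d c n => (if d.contains c then d else d.insert c []).modify c [] (· ++ [n]))
      PySem.Dict.empty).trans
    (PySem.List.foldl_congr_mem l _ _ PySem.Dict.empty
      (fun d p _ => stepA_eq_modify d p.1 p.2))
  have hnodA : (l.foldl (fun d p => d.modify p.1 [] (· ++ [p.2])) PySem.Dict.empty).keys.Nodup :=
    PySem.Dict.nodup_keys_foldl_modify_key l Prod.fst [] (fun _ p v => v ++ [p.2])
      PySem.Dict.empty PySem.Dict.nodup_keys_empty
  have hkeysA : (l.foldl (fun d p => d.modify p.1 [] (· ++ [p.2])) PySem.Dict.empty).keys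
      = PySem.Set.ofList (l.map Prod.fst) :=
    PySem.Dict.keys_foldl_modify_key l Prod.fst [] (fun _ p v => v ++ [p.2]) PySem.Dict.empty
  have hgetA : ∀ c, (l.foldl (fun d p => d.modify p.1 [] (· ++ [p.2])) PySem.Dict.empty).getD c []
      = (l.filter (fun p => p.1 == c)).map (fun x => x.2) := by
    intro c
    have := PySem.Dict.getD_foldl_modify_append l PySem.Dict.empty c
    rwa [PySem.Dict.getD_empty, List.nil_append] at this
  -- B side: labels are the distinct labels in order of first appearance
  have hlabels :
      (PySem.List.pyRange 0 (nodes.length : Int) 1).foldl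
        (fun (ls : List Int) i =>
          let c := PySem.List.pyGetD partition i 0
          if c ∈ ls then ls else ls ++ [c]) []
      = PySem.Set.ofList (l.map Prod.fst) :=
    (foldl_idx nodes partition hpre (fun ls c _ => if c ∈ ls then ls else ls ++ [c]) []).trans
    (by rw [PySem.Set.ofList_eq_foldl, List.foldl_map]
        exact PySem.List.foldl_congr_mem l _ _ []
          (fun a p _ => by simp [PySem.Set.add, PySem.Set.contains]))
  have hcomp : ∀ c,
      (PySem.List.pyRange 0 (nodes.length : Int) 1).filterMap
        (fun i => if PySem.List.pyGetD partition i 0 = c then some (PySem.List.pyGetD nodes i 0) else none)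
      = (l.filter (fun p => p.1 == c)).map (fun x => x.2) := by
    intro c
    exact (filterMap_idx nodes partition hpre (fun x n => if x = c then some n else none)).trans
      (filterMap_pairs l c)
  rw [hA, PySem.Dict.items_eq_map_keys _ hnodA [], hkeysA]
  simp only [hlabels, hcomp]
  have hfresh : ∀ a ∈ PySem.Set.ofList (l.map Prod.fst),
      (PySem.Dict.empty : PySem.Dict Int (List Int)).contains a = false :=
    fun a _ => PySem.Dict.contains_empty a
  rw [PySem.Dict.items_foldl_insert_fresh (PySem.Set.ofList (l.map Prod.fst))
        (fun c => c) (fun c => (l.filter (fun p => p.1 == c)).map (fun x => x.2))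
        PySem.Dict.empty hfresh (by rw [List.map_id_fun']; exact PySem.Set.nodup_ofList (l.map Prod.fst))]
  refine Eq.trans (List.map_congr_left fun c _ => ?_) (List.nil_append _).symm
  rw [hgetA c]
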